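-- pv_equiv track=rewrite | github.com/henrinikku/tira2021 | viikko2/splitlist.py | count
-- ===== SOURCE A (Python) =====
-- from typing import  List
--
-- def count(t: List[int]):
--     if not t:
--         return 0
--
--     left = {}
--     largest = None
--     for i, n in enumerate(t):
--         largest = n if largest is None else max(n, largest)
--         left[i] = largest
--
--     right = {}
--     smallest = None
--     for i, n in reversed(list(enumerate(t))):
--         smallest = n if smallest is None else min(n, smallest)
--         right[i] = smallest
--
--     return sum(left[i - 1] < right[i] for i in range(1, len(t)))
-- ===== SOURCE B (Python) =====
-- def count(t):
--     n = len(t)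
--     pairs = sorted(((v, i) for i, v in enumerate(t)), key=lambda p: p[0])
--     cnt = 0
--     if n == 0:
--         return 0
--     maxidx = pairs[0][1]
--     for k in range(1, n):
--         v, i = pairs[k]
--         if maxidx == k - 1 and pairs[k - 1][0] < v:
--             cnt += 1
--         maxidx = max(maxidx, i)
--     return cnt
-- ===== Notes on version B (the rewrite author's own statement) =====
-- stated objective: alternative
-- what changed: Replaces the prefix-max/suffix-min table construction entirely by a sorting-based algorithm: sort (value, index) pairs by value, then scan the sorted order once keeping the running maximum original index; a split at k is valid iff the k smallest values occupy exactly the first k positions (running max index == k-1) and the k-th and (k+1)-th sorted values differ strictly.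
import Mathlib
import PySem

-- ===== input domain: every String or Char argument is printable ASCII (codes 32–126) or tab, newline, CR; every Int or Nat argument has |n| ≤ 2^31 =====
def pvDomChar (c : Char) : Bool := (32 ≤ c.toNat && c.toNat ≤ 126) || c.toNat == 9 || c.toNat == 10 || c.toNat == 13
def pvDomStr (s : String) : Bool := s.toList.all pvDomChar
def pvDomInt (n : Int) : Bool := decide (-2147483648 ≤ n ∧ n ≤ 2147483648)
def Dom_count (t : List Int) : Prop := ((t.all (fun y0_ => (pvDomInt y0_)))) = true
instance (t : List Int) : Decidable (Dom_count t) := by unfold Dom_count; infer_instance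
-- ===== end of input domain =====

-- B abandons A's prefix-max/suffix-min tables for a sorting-based algorithm: sort (value, index)
-- pairs by value, scan the sorted order once with a running maximum original index; a split at k
-- is valid iff that running max equals k-1 and the adjacent sorted values differ strictly.

-- ===== PORT A =====
def count (t : List Int) : Int :=
  if t = [] then 0
  else
    let left := ((PySem.List.enumerate t 0).foldl
      (fun (st : PySem.Dict Int Int × Option Int) p =>
        let largest : Int := match st.2 with | none => p.2 | some l => max p.2 l
        (st.1.insert p.1 largest, some largest))
      ((PySem.Dict.empty : PySem.Dict Int Int), none)).1
    let right := ((PySem.List.enumerate t 0).reverse.foldl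
      (fun (st : PySem.Dict Int Int × Option Int) p =>
        let smallest : Int := match st.2 with | none => p.2 | some s => min p.2 s
        (st.1.insert p.1 smallest, some smallest))
      ((PySem.Dict.empty : PySem.Dict Int Int), none)).1
    (PySem.List.pyRange 1 (t.length : Int) 1).foldl
      (fun acc i => acc + (if left.getD (i - 1) 0 < right.getD i 0 then 1 else 0)) 0

-- ===== PORT B =====
def count_alt (t : List Int) : Int :=
  let n : Int := (t.length : Int)
  let pairs : List (Int × Int) :=
    PySem.List.sorted ((PySem.List.enumerate t 0).map (fun p => (p.2, p.1))) (fun p => p.1) false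
  if n = 0 then 0
  else
    ((PySem.List.pyRange 1 n 1).foldl
      (fun (st : Int × Int) k =>
        let p := PySem.List.pyGetD pairs k (0, 0)
        let cnt : Int :=
          if st.1 = k - 1 ∧ (PySem.List.pyGetD pairs (k - 1) (0, 0)).1 < p.1 then st.2 + 1 else st.2
        (max st.1 p.2, cnt))
      ((PySem.List.pyGetD pairs 0 (0, 0)).2, 0)).2

-- ===== PRECONDITION & SPEC =====
def Spec_count (t : List Int) (out : Int) : Prop := out = count_alt t
instance (t : List Int) (out : Int) : Decidable (Spec_count t out) := by unfold Spec_count; infer_instance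

-- ===== CLAIM (what is proved, stated in full; the proofs are below) =====
def Claim_equal_count : Prop := ∀ (t : List Int), Dom_count t → Spec_count t (count t)

-- ===== LEMMAS AND PROOFS =====

-- max of a nonempty list (0 on []): pmax1 (t.take i) is the prefix maximum over the first i elements
def pmax1 : List Int → Int
  | [] => 0
  | x :: xs => xs.foldl max x

-- min of a nonempty list (0 on []): smin1 (t.drop i) is the suffix minimum from index i
def smin1 : List Int → Int
  | [] => 0
  | [a] => a
  | a :: b :: l => min a (smin1 (b :: l))

-- the common indicator: 1 iff prefix-max before i < suffix-min from i
def gIdx (t : List Int) (i : Int) : Int :=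
  if pmax1 (t.take ((i - 1).toNat + 1)) < smin1 (t.drop i.toNat) then 1 else 0

-- the sorted (value, index) pairs B works on
def sPairs (t : List Int) : List (Int × Int) :=
  PySem.List.sorted ((PySem.List.enumerate t 0).map (fun p => (p.2, p.1))) (fun p => p.1) false

-- B's running maximum index after consuming the first k sorted pairs
def nIdx (t : List Int) (k : Nat) : Int :=
  ((sPairs t).take k).foldl (fun m q => max m q.2) (PySem.List.pyGetD (sPairs t) 0 (0, 0)).2

-- B's per-split indicator
def indB (t : List Int) (i : Int) : Int :=
  if nIdx t i.toNat = i - 1 ∧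
      (PySem.List.pyGetD (sPairs t) (i - 1) (0, 0)).1 < (PySem.List.pyGetD (sPairs t) i (0, 0)).1
  then 1 else 0

-- the (value, index) pairs of the length-i prefix of t, in original order
def pList (t : List Int) (i : Nat) : List (Int × Int) :=
  (PySem.List.enumerate (t.take i) 0).map (fun p => (p.2, p.1))

theorem smin1_cons (a : Int) (l : List Int) (h : l ≠ []) : smin1 (a :: l) = min a (smin1 l) := by
  cases l with
  | nil => exact absurd rfl h
  | cons b m => rfl

theorem foldr_min_smin1 (m : List Int) (y : Int) : m.foldr min y = smin1 (m ++ [y]) := by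
  induction m with
  | nil => rfl
  | cons a l ih =>
    rw [List.foldr_cons, ih, List.cons_append, smin1_cons a (l ++ [y]) (by simp)]

theorem leftA_getD (xs : List Int) : ∀ (s : Int) (d : PySem.Dict Int Int) (cur j : Int),
    (((PySem.List.enumerate xs s).foldl
      (fun (st : PySem.Dict Int Int × Option Int) p =>
        let largest : Int := match st.2 with | none => p.2 | some l => max p.2 l
        (st.1.insert p.1 largest, some largest))
      (d, some cur)).1).getD j 0 =
    if s ≤ j ∧ j < s + xs.length then (xs.take ((j - s).toNat + 1)).foldl max cur
    else d.getD j 0 := by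
  induction xs with
  | nil =>
    intro s d cur j
    simp only [PySem.List.enumerate_nil, List.foldl_nil, List.length_nil, Nat.cast_zero, add_zero]
    rw [if_neg (by omega)]
  | cons x xs ih =>
    intro s d cur j
    rw [PySem.List.enumerate_cons, List.foldl_cons]
    simp only []
    rw [ih (s + 1) (d.insert s (max x cur)) (max x cur) j]
    by_cases h1 : s + 1 ≤ j ∧ j < s + 1 + (xs.length : Int)
    · rw [if_pos h1, if_pos (by simp only [List.length_cons]; push_cast; omega)]
      have hkn : (j - s).toNat = (j - (s + 1)).toNat + 1 := by omega
      rw [hkn, List.take_succ_cons, List.foldl_cons, max_comm cur x]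
    · rw [if_neg h1]
      by_cases h2 : j = s
      · subst h2
        rw [PySem.Dict.getD_insert, if_pos rfl,
          if_pos (by simp only [List.length_cons]; push_cast; omega)]
        have : (j - j).toNat = 0 := by omega
        rw [this, List.take_succ_cons, List.take_zero, List.foldl_cons, List.foldl_nil,
          max_comm cur x]
      · rw [PySem.Dict.getD_insert, if_neg h2,
          if_neg (by simp only [List.length_cons]; push_cast; omega)]

theorem left_final (x : Int) (xs : List Int) (j : Int) (h0 : 0 ≤ j) (h1 : j < ((x :: xs).length : Int)) :
    (((PySem.List.enumerate (x :: xs) 0).foldl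
      (fun (st : PySem.Dict Int Int × Option Int) p =>
        let largest : Int := match st.2 with | none => p.2 | some l => max p.2 l
        (st.1.insert p.1 largest, some largest))
      ((PySem.Dict.empty : PySem.Dict Int Int), none)).1).getD j 0 =
    pmax1 ((x :: xs).take (j.toNat + 1)) := by
  rw [PySem.List.enumerate_cons, List.foldl_cons]
  simp only [zero_add]
  have H := leftA_getD xs 1 (PySem.Dict.empty.insert 0 x) x j
  simp only [] at H
  rw [H]
  rw [List.take_succ_cons, pmax1]
  by_cases h2 : 1 ≤ j
  · rw [if_pos (by simp only [List.length_cons, Nat.cast_add, Nat.cast_one] at h1; omega)]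
    have : j.toNat = (j - 1).toNat + 1 := by omega
    rw [this]
  · have : j = 0 := by omega
    subst this
    rw [if_neg (by omega), PySem.Dict.getD_insert, if_pos rfl]
    rfl

theorem rightA_getD (xs : List Int) : ∀ (s : Int) (d : PySem.Dict Int Int) (cur j : Int),
    ((((PySem.List.enumerate xs s).reverse).foldl
      (fun (st : PySem.Dict Int Int × Option Int) p =>
        let smallest : Int := match st.2 with | none => p.2 | some s => min p.2 s
        (st.1.insert p.1 smallest, some smallest))
      (d, some cur)).1).getD j 0 =
    if s ≤ j ∧ j < s + xs.length then (xs.drop (j - s).toNat).foldr min cur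
    else d.getD j 0 := by
  induction xs using List.reverseRecOn with
  | nil =>
    intro s d cur j
    simp only [PySem.List.enumerate_nil, List.reverse_nil, List.foldl_nil, List.length_nil,
      Nat.cast_zero, add_zero]
    rw [if_neg (by omega)]
  | append_singleton ys y ih =>
    intro s d cur j
    rw [PySem.List.enumerate_append]
    simp only [PySem.List.enumerate_cons, PySem.List.enumerate_nil, List.reverse_append,
      List.reverse_cons, List.reverse_nil, List.nil_append, List.singleton_append,
      List.foldl_cons]
    have H := ih s (d.insert (s + (ys.length : Int)) (min y cur)) (min y cur) j
    simp only [] at H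
    rw [H]
    by_cases h1 : s ≤ j ∧ j < s + (ys.length : Int)
    · rw [if_pos h1, if_pos (by simp only [List.length_append, List.length_cons, List.length_nil]; push_cast; omega)]
      have hle : (j - s).toNat ≤ ys.length := by omega
      rw [List.drop_append_of_le_length hle, List.foldr_append, List.foldr_cons, List.foldr_nil]
    · rw [if_neg h1, PySem.Dict.getD_insert]
      by_cases h2 : j = s + (ys.length : Int)
      · rw [if_pos h2, if_pos (by simp only [List.length_append, List.length_cons, List.length_nil]; push_cast; omega)]
        have : (j - s).toNat = ys.length := by omega
        rw [this]
        simp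
      · rw [if_neg h2, if_neg (by simp only [List.length_append, List.length_cons, List.length_nil]; push_cast; omega)]

theorem right_final (ys : List Int) (y : Int) (j : Int) (h0 : 0 ≤ j)
    (h1 : j < ((ys ++ [y]).length : Int)) :
    ((((PySem.List.enumerate (ys ++ [y]) 0).reverse).foldl
      (fun (st : PySem.Dict Int Int × Option Int) p =>
        let smallest : Int := match st.2 with | none => p.2 | some s => min p.2 s
        (st.1.insert p.1 smallest, some smallest))
      ((PySem.Dict.empty : PySem.Dict Int Int), none)).1).getD j 0 =
    smin1 ((ys ++ [y]).drop j.toNat) := by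
  rw [PySem.List.enumerate_append]
  simp only [PySem.List.enumerate_cons, PySem.List.enumerate_nil, List.reverse_append,
    List.reverse_cons, List.reverse_nil, List.nil_append, List.singleton_append,
    List.foldl_cons, zero_add]
  have H := rightA_getD ys 0 (PySem.Dict.empty.insert (ys.length : Int) y) y j
  simp only [] at H
  rw [H]
  simp only [List.length_append, List.length_cons, List.length_nil, Nat.cast_add,
    Nat.cast_one] at h1
  by_cases h2 : j < (ys.length : Int)
  · rw [if_pos (by omega)]
    have hle : j.toNat ≤ ys.length := by omega
    have : (j - 0).toNat = j.toNat := by omega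
    rw [this, List.drop_append_of_le_length hle, foldr_min_smin1]
  · have hj : j = (ys.length : Int) := by omega
    subst hj
    rw [if_neg (by omega), PySem.Dict.getD_insert, if_pos rfl]
    have : ((ys.length : Int)).toNat = ys.length := by omega
    rw [this, List.drop_append_of_le_length (le_refl _)]
    simp [smin1]

theorem A_eq_sum (t : List Int) (h : t ≠ []) :
    count t = ((PySem.List.pyRange 1 (t.length : Int) 1).map (gIdx t)).sum := by
  cases t with
  | nil => exact absurd rfl h
  | cons x xs =>
    obtain ⟨ys, y, hys⟩ : ∃ ys y, x :: xs = ys ++ [y] := by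
      rcases (x :: xs).eq_nil_or_concat with h' | ⟨ys, y, h'⟩
      · exact absurd h' h
      · exact ⟨ys, y, by simpa [List.concat_eq_append] using h'⟩
    simp only [count, if_neg h]
    rw [PySem.List.foldl_add _ (fun i => if ((PySem.List.enumerate (x :: xs) 0).foldl
      (fun (st : PySem.Dict Int Int × Option Int) p =>
        ((st.1.insert p.1 (match st.2 with | none => p.2 | some l => max p.2 l)),
          some (match st.2 with | none => p.2 | some l => max p.2 l)))
      ((PySem.Dict.empty : PySem.Dict Int Int), none)).1.getD (i - 1) 0 <
      (((PySem.List.enumerate (x :: xs) 0).reverse).foldl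
      (fun (st : PySem.Dict Int Int × Option Int) p =>
        ((st.1.insert p.1 (match st.2 with | none => p.2 | some s => min p.2 s)),
          some (match st.2 with | none => p.2 | some s => min p.2 s)))
      ((PySem.Dict.empty : PySem.Dict Int Int), none)).1.getD i 0 then (1 : Int) else 0) 0, zero_add]
    refine congrArg List.sum (List.map_congr_left ?_)
    intro i hi
    rw [PySem.List.mem_pyRange_one] at hi
    have H1 := left_final x xs (i - 1) (by omega)
      (by simp only [List.length_cons] at hi ⊢; push_cast at hi ⊢; omega)
    simp only [] at H1
    rw [H1]
    rw [hys]
    have H2 := right_final ys y i (by omega)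
      (by rw [← hys]; simp only [List.length_cons] at hi ⊢; push_cast at hi ⊢; omega)
    simp only [] at H2
    rw [H2]
    rfl

-- ===== B-side lemmas =====

theorem length_sPairs (t : List Int) : (sPairs t).length = t.length := by
  simp [sPairs, PySem.List.length_sorted, PySem.List.length_enumerate]

theorem mem_sPairs (t : List Int) (x : Int × Int) :
    x ∈ sPairs t ↔ ∃ (j : Nat) (h : j < t.length), x = (t[j], (j : Int)) := by
  simp only [sPairs, PySem.List.mem_sorted, List.mem_map, PySem.List.mem_enumerate_iff]
  constructor
  · rintro ⟨p, ⟨k, hk, rfl⟩, rfl⟩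
    exact ⟨k, hk, by simp⟩
  · rintro ⟨j, hj, rfl⟩
    exact ⟨((j : Int), t[j]), ⟨j, hj, by simp⟩, rfl⟩

theorem snd_nodup_sPairs (t : List Int) : ((sPairs t).map (·.2)).Nodup := by
  have hp : (sPairs t).Perm ((PySem.List.enumerate t 0).map (fun p => (p.2, p.1))) :=
    PySem.List.sorted_perm _ _ _
  refine (List.Perm.nodup_iff (hp.map (·.2))).mpr ?_
  have : (((PySem.List.enumerate t 0).map (fun p => (p.2, p.1))).map (·.2)) =
      (PySem.List.enumerate t 0).map (fun p => p.1) := by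
    simp [List.map_map, Function.comp]
  rw [this, PySem.List.map_fst_enumerate]
  exact PySem.List.nodup_pyRange_one _ _

theorem nodup_sPairs (t : List Int) : (sPairs t).Nodup :=
  (snd_nodup_sPairs t).of_map

theorem mono_sPairs (t : List Int) (p q : Nat) (hpq : p ≤ q) (hq : q < (sPairs t).length) :
    (sPairs t)[p].1 ≤ (sPairs t)[q].1 := by
  have := PySem.List.key_sorted_getElem_mono
    ((PySem.List.enumerate t 0).map (fun p => (p.2, p.1))) (fun p => p.1) hpq
    (by simpa [sPairs] using hq)
  simpa [sPairs] using this

theorem mem_pList (t : List Int) (i : Nat) (x : Int × Int) :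
    x ∈ pList t i ↔ ∃ (j : Nat) (h : j < t.length), j < i ∧ x = (t[j], (j : Int)) := by
  simp only [pList, List.mem_map, PySem.List.mem_enumerate_iff]
  constructor
  · rintro ⟨p, ⟨k, hk, rfl⟩, rfl⟩
    have hk1 : k < t.length := by
      have := hk; simp [List.length_take] at this; omega
    have hk2 : k < i := by
      have := hk; simp [List.length_take] at this; omega
    exact ⟨k, hk1, hk2, by simp [List.getElem_take]⟩
  · rintro ⟨j, hj, hji, rfl⟩
    refine ⟨((j : Int), t[j]), ⟨j, ?_, ?_⟩, rfl⟩
    · simp [List.length_take]; omega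
    · simp [List.getElem_take]

theorem length_pList (t : List Int) (i : Nat) (h : i ≤ t.length) : (pList t i).length = i := by
  simp [pList, PySem.List.length_enumerate, h]

theorem nodup_pList (t : List Int) (i : Nat) : (pList t i).Nodup := by
  have h : ((pList t i).map (·.2)).Nodup := by
    have : ((pList t i).map (·.2)) = (PySem.List.enumerate (t.take i) 0).map (fun p => p.1) := by
      simp [pList, List.map_map, Function.comp]
    rw [this, PySem.List.map_fst_enumerate]
    exact PySem.List.nodup_pyRange_one _ _
  exact h.of_map

-- the two pigeonhole directions: either containment gives the permutation with the prefix pairs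
theorem take_perm_of_bound (t : List Int) (i : Nat) (hi : i ≤ t.length)
    (hb : ∀ x ∈ (sPairs t).take i, x.2 ≤ (i : Int) - 1) :
    ((sPairs t).take i).Perm (pList t i) := by
  have hnd : ((sPairs t).take i).Nodup :=
    (List.take_sublist i (sPairs t)).nodup (nodup_sPairs t)
  have hsub : ((sPairs t).take i) ⊆ pList t i := by
    intro x hx
    obtain ⟨j, hj, rfl⟩ := (mem_sPairs t x).mp (List.mem_of_mem_take hx)
    have hb' := hb _ hx
    simp only at hb'
    exact (mem_pList t i _).mpr ⟨j, hj, by omega, rfl⟩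
  refine (List.subperm_of_subset hnd hsub).perm_of_length_le ?_
  rw [length_pList t i hi, List.length_take, length_sPairs]
  omega

theorem take_perm_of_mem (t : List Int) (i : Nat) (hi : i ≤ t.length)
    (hm : ∀ j : Nat, (h : j < t.length) → j < i → (t[j], (j : Int)) ∈ (sPairs t).take i) :
    ((sPairs t).take i).Perm (pList t i) := by
  have hsub : pList t i ⊆ (sPairs t).take i := by
    intro x hx
    obtain ⟨j, hj, hji, rfl⟩ := (mem_pList t i x).mp hx
    exact hm j hj hji
  refine ((List.subperm_of_subset (nodup_pList t i) hsub).perm_of_length_le ?_).symm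
  rw [length_pList t i hi, List.length_take, length_sPairs]
  omega

theorem pmax1_spec (l : List Int) (h : l ≠ []) : pmax1 l ∈ l ∧ ∀ y ∈ l, y ≤ pmax1 l := by
  cases l with
  | nil => exact absurd rfl h
  | cons x xs =>
    simp only [pmax1]
    constructor
    · rcases PySem.List.foldl_max_mem xs x with h1 | h1
      · rw [h1]; exact List.mem_cons_self
      · exact List.mem_cons_of_mem _ h1
    · intro y hy
      rcases List.mem_cons.mp hy with rfl | hy
      · exact (PySem.List.le_foldl_max xs y).1
      · exact (PySem.List.le_foldl_max xs x).2 y hy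

theorem smin1_spec (l : List Int) (h : l ≠ []) : smin1 l ∈ l ∧ ∀ y ∈ l, smin1 l ≤ y := by
  induction l with
  | nil => exact absurd rfl h
  | cons a l ih =>
    cases l with
    | nil => simp [smin1]
    | cons b m =>
      have h' := ih (by simp)
      rw [smin1_cons a (b :: m) (by simp)]
      constructor
      · rcases le_total a (smin1 (b :: m)) with hab | hab
        · rw [min_eq_left hab]; exact List.mem_cons_self
        · rw [min_eq_right hab]; exact List.mem_cons_of_mem _ h'.1
      · intro y hy
        rcases List.mem_cons.mp hy with rfl | hy
        · exact min_le_left _ _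
        · exact le_trans (min_le_right _ _) (h'.2 y hy)

-- elementwise characterisation of the split condition
theorem good_iff_elem (t : List Int) (i : Nat) (hi : 1 ≤ i) (hin : i < t.length) :
    (pmax1 (t.take i) < smin1 (t.drop i)) ↔
      (∀ (j k : Nat) (hj : j < t.length) (hk : k < t.length), j < i → i ≤ k → t[j] < t[k]) := by
  have ht1 : t.take i ≠ [] := by
    apply List.ne_nil_of_length_pos
    rw [List.length_take]; omega
  have ht2 : t.drop i ≠ [] := by
    apply List.ne_nil_of_length_pos
    rw [List.length_drop]; omega
  obtain ⟨hm1, hm2⟩ := pmax1_spec _ ht1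
  obtain ⟨hn1, hn2⟩ := smin1_spec _ ht2
  constructor
  · intro h j k hj hk hji hik
    have hjt : t[j] ∈ t.take i :=
      List.mem_iff_getElem.mpr ⟨j, by rw [List.length_take]; omega, List.getElem_take⟩
    have hkt : t[k] ∈ t.drop i := by
      refine List.mem_iff_getElem.mpr ⟨k - i, by rw [List.length_drop]; omega, ?_⟩
      rw [List.getElem_drop]; congr 1; omega
    have := hm2 _ hjt
    have := hn2 _ hkt
    omega
  · intro h
    obtain ⟨p, hp, hpe⟩ := List.mem_iff_getElem.mp hm1
    obtain ⟨q, hq, hqe⟩ := List.mem_iff_getElem.mp hn1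
    rw [List.length_take] at hp
    rw [List.length_drop] at hq
    rw [List.getElem_take] at hpe
    rw [List.getElem_drop] at hqe
    rw [← hpe, ← hqe]
    exact h p (i + q) (by omega) (by omega) (by omega) (by omega)

-- B's condition at split i equals the split condition
theorem condB_iff_good (t : List Int) (i : Nat) (hi : 1 ≤ i) (hin : i < t.length) :
    (nIdx t i = (i : Int) - 1 ∧
      (PySem.List.pyGetD (sPairs t) ((i : Int) - 1) (0, 0)).1 <
        (PySem.List.pyGetD (sPairs t) (i : Int) (0, 0)).1) ↔
      (pmax1 (t.take i) < smin1 (t.drop i)) := by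
  have hlen := length_sPairs t
  have hilen : i < (sPairs t).length := by omega
  have hi1len : i - 1 < (sPairs t).length := by omega
  have hgi : PySem.List.pyGetD (sPairs t) (i : Int) (0, 0) = (sPairs t)[i]'hilen := by
    rw [PySem.List.pyGetD_eq_getElem _ _ (by omega) (by rw [hlen]; exact_mod_cast hin)]
    congr 1
  have hgi1 : PySem.List.pyGetD (sPairs t) ((i : Int) - 1) (0, 0) = (sPairs t)[i - 1]'hi1len := by
    rw [PySem.List.pyGetD_eq_getElem _ _ (by omega) (by rw [hlen]; omega)]
    congr 1
    omega
  rw [hgi, hgi1, good_iff_elem t i hi hin]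
  constructor
  · rintro ⟨hN, hlt⟩ j k hj hk hji hik
    have hmax : ∀ x ∈ (sPairs t).take i, x.2 ≤ (i : Int) - 1 := by
      intro x hx
      have h2 := (PySem.List.le_foldl_max_int ((sPairs t).take i) (fun q => q.2)
        ((PySem.List.pyGetD (sPairs t) 0 (0, 0)).2)).2 x hx
      have h3 : x.2 ≤ nIdx t i := h2
      omega
    have hperm := take_perm_of_bound t i (by omega) hmax
    have hjmem : ((t[j], (j : Int)) : Int × Int) ∈ (sPairs t).take i :=
      hperm.mem_iff.mpr ((mem_pList t i _).mpr ⟨j, hj, hji, rfl⟩)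
    obtain ⟨p, hp, hpe⟩ := List.mem_iff_getElem.mp hjmem
    have hp' : p < i := by rw [List.length_take] at hp; omega
    rw [List.getElem_take] at hpe
    have h1 : t[j] ≤ (sPairs t)[i - 1].1 := by
      have := mono_sPairs t p (i - 1) (by omega) hi1len
      rw [hpe] at this
      simpa using this
    have hkmem : ((t[k], (k : Int)) : Int × Int) ∈ sPairs t := (mem_sPairs t _).mpr ⟨k, hk, rfl⟩
    obtain ⟨q, hq, hqe⟩ := List.mem_iff_getElem.mp hkmem
    have hq' : i ≤ q := by
      by_contra hc
      push Not at hc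
      have hmemtk : ((t[k], (k : Int)) : Int × Int) ∈ (sPairs t).take i :=
        List.mem_iff_getElem.mpr ⟨q, by rw [List.length_take]; omega, by rw [List.getElem_take]; exact hqe⟩
      obtain ⟨j', hj', hji', he⟩ := (mem_pList t i _).mp (hperm.mem_iff.mp hmemtk)
      have : (k : Int) = (j' : Int) := congrArg Prod.snd he
      omega
    have h2 : (sPairs t)[i].1 ≤ t[k] := by
      have := mono_sPairs t i q hq' hq
      rw [hqe] at this
      simpa using this
    omega
  · intro hgood
    have hm : ∀ j : Nat, (h : j < t.length) → j < i → ((t[j], (j : Int)) : Int × Int) ∈ (sPairs t).take i := by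
      intro j hj hji
      by_cases hb : ∀ x ∈ (sPairs t).take i, x.2 ≤ (i : Int) - 1
      · exact (take_perm_of_bound t i (by omega) hb).mem_iff.mpr
          ((mem_pList t i _).mpr ⟨j, hj, hji, rfl⟩)
      · push Not at hb
        obtain ⟨x, hx, hx2⟩ := hb
        obtain ⟨m, hmn, rfl⟩ := (mem_sPairs t x).mp (List.mem_of_mem_take hx)
        have hmge : i ≤ m := by simp at hx2; omega
        obtain ⟨p, hp, hpe⟩ := List.mem_iff_getElem.mp hx
        have hp' : p < i := by rw [List.length_take] at hp; omega
        rw [List.getElem_take] at hpe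
        obtain ⟨q, hq, hqe⟩ := List.mem_iff_getElem.mp ((mem_sPairs t _).mpr ⟨j, hj, rfl⟩)
        by_cases hqi : q < i
        · exact List.mem_iff_getElem.mpr ⟨q, by rw [List.length_take]; omega,
            by rw [List.getElem_take]; exact hqe⟩
        · exfalso
          push Not at hqi
          have hmono := mono_sPairs t p q (by omega) hq
          rw [hpe, hqe] at hmono
          simp only at hmono
          have := hgood j m hj hmn hji hmge
          omega
    have hperm := take_perm_of_mem t i (by omega) hm
    refine ⟨le_antisymm ?_ ?_, ?_⟩
    · have hmem : nIdx t i = (PySem.List.pyGetD (sPairs t) 0 (0, 0)).2 ∨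
          nIdx t i ∈ ((sPairs t).take i).map (·.2) := by
        unfold nIdx
        rw [← List.foldl_map (f := fun q : Int × Int => q.2) (g := max)]
        exact PySem.List.foldl_max_mem _ _
      rcases hmem with h0 | hmem
      · have h00 : PySem.List.pyGetD (sPairs t) 0 (0, 0) = (sPairs t)[0]'(by omega) := by
          rw [PySem.List.pyGetD_eq_getElem _ _ (by omega) (by rw [hlen]; omega)]
          congr 1
        have hs0mem : (sPairs t)[0]'(by omega) ∈ (sPairs t).take i :=
          List.mem_iff_getElem.mpr ⟨0, by rw [List.length_take]; omega, List.getElem_take⟩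
        obtain ⟨j', hj', hji', he⟩ := (mem_pList t i _).mp (hperm.mem_iff.mp hs0mem)
        rw [h0, h00, he]
        simp
        omega
      · obtain ⟨x, hx, hxe⟩ := List.mem_map.mp hmem
        obtain ⟨j', hj', hji', rfl⟩ := (mem_pList t i _).mp (hperm.mem_iff.mp hx)
        rw [← hxe]
        simp
        omega
    · have hmem := hm (i - 1) (by omega) (by omega)
      have h2 := (PySem.List.le_foldl_max_int ((sPairs t).take i) (fun q => q.2)
        ((PySem.List.pyGetD (sPairs t) 0 (0, 0)).2)).2 _ hmem
      have h3 : (((i - 1 : Nat) : Int)) ≤ nIdx t i := h2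
      omega
    · have h1mem : (sPairs t)[i - 1]'hi1len ∈ (sPairs t).take i :=
        List.mem_iff_getElem.mpr ⟨i - 1, by rw [List.length_take]; omega,
          by rw [List.getElem_take]⟩
      obtain ⟨j', hj', hji', hje⟩ := (mem_pList t i _).mp (hperm.mem_iff.mp h1mem)
      obtain ⟨k', hk', hke⟩ := (mem_sPairs t _).mp (List.getElem_mem hilen)
      have hk'i : i ≤ k' := by
        by_contra hc
        push Not at hc
        have hmemtk : (sPairs t)[i]'hilen ∈ (sPairs t).take i :=
          hperm.mem_iff.mpr ((mem_pList t i _).mpr ⟨k', hk', hc, hke⟩)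
        obtain ⟨p, hp, hpe⟩ := List.mem_iff_getElem.mp hmemtk
        have hp' : p < i := by rw [List.length_take] at hp; omega
        rw [List.getElem_take] at hpe
        have := ((nodup_sPairs t).getElem_inj_iff).mp hpe
        omega
      rw [hje, hke]
      exact hgood j' k' hj' hk' hji' hk'i

theorem nIdx_succ (t : List Int) (a : Nat) (ha : a < t.length) :
    nIdx t (a + 1) = max (nIdx t a) (PySem.List.pyGetD (sPairs t) (a : Int) (0, 0)).2 := by
  have hlt : a < (sPairs t).length := by rw [length_sPairs]; exact ha
  unfold nIdx
  rw [List.take_add_one, List.getElem?_eq_getElem hlt]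
  simp only [Option.toList_some, List.foldl_append, List.foldl_cons, List.foldl_nil]
  have hg : PySem.List.pyGetD (sPairs t) (a : Int) (0, 0) = (sPairs t)[a]'hlt := by
    rw [PySem.List.pyGetD_eq_getElem _ _ (by omega) (by rw [length_sPairs]; exact_mod_cast ha)]
    congr 1
  rw [hg]

theorem Bloop (t : List Int) : ∀ (k : Nat) (a c : Int), a = (t.length : Int) - k → 1 ≤ a →
    ((PySem.List.pyRange a (t.length : Int) 1).foldl
      (fun (st : Int × Int) k =>
        let p := PySem.List.pyGetD (sPairs t) k (0, 0)
        let cnt : Int :=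
          if st.1 = k - 1 ∧ (PySem.List.pyGetD (sPairs t) (k - 1) (0, 0)).1 < p.1 then st.2 + 1 else st.2
        (max st.1 p.2, cnt))
      (nIdx t a.toNat, c)).2
    = c + ((PySem.List.pyRange a (t.length : Int) 1).map (indB t)).sum := by
  intro k
  induction k with
  | zero =>
    intro a c ha h1
    rw [PySem.List.pyRange_one_eq_nil (by omega)]
    simp
  | succ k ih =>
    intro a c ha h1
    have hn : a < (t.length : Int) := by omega
    rw [PySem.List.pyRange_one_cons hn]
    simp only [List.foldl_cons, List.map_cons, List.sum_cons]
    have e1 : max (nIdx t a.toNat) (PySem.List.pyGetD (sPairs t) a (0, 0)).2 = nIdx t (a + 1).toNat := by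
      have h2 := nIdx_succ t a.toNat (by omega)
      have e : ((a.toNat : Nat) : Int) = a := by omega
      rw [e] at h2
      rw [← h2]
      congr 1
      omega
    have e2 : (if nIdx t a.toNat = a - 1 ∧
        (PySem.List.pyGetD (sPairs t) (a - 1) (0, 0)).1 < (PySem.List.pyGetD (sPairs t) a (0, 0)).1
        then c + 1 else c) = c + indB t a := by
      unfold indB
      split_ifs <;> ring
    rw [e1, e2, ih (a + 1) (c + indB t a) (by omega) (by omega)]
    ring

theorem B_eq_sum (t : List Int) (h : t ≠ []) :
    count_alt t = ((PySem.List.pyRange 1 (t.length : Int) 1).map (indB t)).sum := by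
  have hl : 0 < t.length := List.length_pos_of_ne_nil h
  have hn : ((t.length : Int)) ≠ 0 := by omega
  simp only [count_alt]
  rw [if_neg hn]
  have hsp : (PySem.List.sorted ((PySem.List.enumerate t 0).map (fun p => (p.2, p.1)))
      (fun p => p.1) false) = sPairs t := rfl
  rw [hsp]
  have hslen : 0 < (sPairs t).length := by rw [length_sPairs]; omega
  have h1 : (PySem.List.pyGetD (sPairs t) 0 (0, 0)).2 = nIdx t (1 : Nat) := by
    unfold nIdx
    rw [List.take_one, List.head?_eq_getElem?, List.getElem?_eq_getElem hslen]
    simp only [Option.toList_some, List.foldl_cons, List.foldl_nil]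
    rw [PySem.List.pyGetD_eq_getElem _ _ le_rfl (by exact_mod_cast hslen)]
    simp
  rw [h1]
  have h2 := Bloop t (t.length - 1) 1 0 (by omega) (by omega)
  have e : ((1 : Int)).toNat = (1 : Nat) := rfl
  rw [e] at h2
  rw [h2, zero_add]

theorem indB_eq_gIdx (t : List Int) (i : Int) (hi : 1 ≤ i) (hin : i < (t.length : Int)) :
    indB t i = gIdx t i := by
  have hi1 : 1 ≤ i.toNat := by omega
  have hin' : i.toNat < t.length := by omega
  have hcond := condB_iff_good t i.toNat hi1 hin'
  have e : ((i.toNat : Nat) : Int) = i := by omega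
  rw [e] at hcond
  unfold indB gIdx
  have e2 : (i - 1).toNat + 1 = i.toNat := by omega
  rw [e2]
  exact if_congr hcond rfl rfl

-- ===== VERDICT (by name: the statement is the Claim_ definition above) =====
theorem count_spec : Claim_equal_count := by
  intro t _
  unfold Spec_count
  rcases eq_or_ne t [] with rfl | h
  · rfl
  · rw [A_eq_sum t h, B_eq_sum t h]
    refine congrArg List.sum (List.map_congr_left ?_)
    intro i hi
    rw [PySem.List.mem_pyRange_one] at hi
    exact (indB_eq_gIdx t i hi.1 hi.2).symm
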